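-- pv_equiv track=rewrite | github.com/jsuci/gidapp | swertres/position_digits_v2.1.py | is_sequence
-- ===== SOURCE A (Python) =====
-- from itertools import islice
--
-- def is_sequence(list_of_digits):
--     """Given a list of unsorted integers ex. [4, 8, 3, ...] from
--     0 to 9 of any given length, check if all the values fit the
--     conditions below:
--         if all digits has a difference of 1 then return 1
--         if some digits are in sequence and the other digit has
--         a difference of of 2 then return 2
--         else return 0
--     """
--     list_of_digits.sort()
--     start = list_of_digits[0]
--     first_digit = list_of_digits[0]
--     last_digit = list_of_digits[-1]
--     diff_not_one = []
--
--     for digit in islice(list_of_digits, 1, None):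
--         if abs(start - digit) != 1:
--             diff_not_one.append(abs(start - digit))
--
--         start = digit
--
--     diff_not_one.sort()
--
--     len_diff_not_one = len(diff_not_one)
--
--     if not len_diff_not_one:
--         return 1
--     else:
--         if first_digit == 0 and last_digit == 9:
--             if len_diff_not_one == 1:
--                 if diff_not_one[0] == 2:
--                     return 2
--                 else:
--                     return 1
--             elif (
--                 len_diff_not_one == 2 and
--                 diff_not_one[0] == 2 and
--                 diff_not_one[1] != 2
--             ):
--                 return 2
--             else:
--                 return 0
--         elif first_digit == 0 and last_digit == 8:
--             if len_diff_not_one == 1: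
--                 return 2
--             else:
--                 return 0
--         else:
--             if len_diff_not_one == 1 and diff_not_one[0] == 2:
--                 return 2
--             else:
--                 return 0
-- ===== SOURCE B (Python) =====
-- def is_sequence(list_of_digits):
--     """Set-membership re-implementation: no sorting at all.  Build the set of
--     distinct digits; duplicates contribute the zero gaps, and each distinct d
--     with d+1 absent (and d not the maximum) starts a non-1 gap, which equals 2
--     exactly when d+2 is present.  Classify from those counts.
--     Return value only: unlike A it does not sort the argument in place."""
--     s = set(list_of_digits)
--     lo, hi = min(s), max(s)
--     dup = len(list_of_digits) - len(s)
--     t = c2 = 0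
--     for d in s:
--         if d != hi and d + 1 not in s:
--             t += 1
--             if d + 2 in s:
--                 c2 += 1
--     m = dup + t
--     if m == 0:
--         return 1
--     if lo == 0 and hi == 9:
--         if m == 1:
--             return 2 if (dup == 0 and c2 == 1) else 1
--         return 2 if (dup == 0 and t == 2 and c2 == 1) else 0
--     if lo == 0 and hi == 8:
--         return 2 if m == 1 else 0
--     return 2 if (dup == 0 and t == 1 and c2 == 1) else 0
-- ===== Notes on version B (the rewrite author's own statement) =====
-- stated objective: alternative
-- what changed: B never sorts: it builds the set of distinct digits and classifies from order-free membership tests (duplicates = zero gaps; a distinct d below the maximum with d+1 absent starts a non-1 gap, which equals 2 iff d+2 is present), replacing A's sort, adjacent-difference scan and second sort of the gap list.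
import Mathlib
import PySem

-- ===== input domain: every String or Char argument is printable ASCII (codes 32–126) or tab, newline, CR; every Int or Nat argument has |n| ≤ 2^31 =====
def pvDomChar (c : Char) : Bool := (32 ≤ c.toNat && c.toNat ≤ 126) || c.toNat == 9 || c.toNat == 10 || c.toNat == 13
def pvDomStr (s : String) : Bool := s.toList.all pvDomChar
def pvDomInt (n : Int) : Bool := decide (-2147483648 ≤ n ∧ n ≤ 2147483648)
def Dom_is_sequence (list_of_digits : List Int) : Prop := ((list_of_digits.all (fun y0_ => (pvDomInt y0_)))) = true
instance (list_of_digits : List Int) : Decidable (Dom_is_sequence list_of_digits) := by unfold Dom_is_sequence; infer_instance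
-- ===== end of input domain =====

-- B drops A's sort-and-scan entirely: it classifies from the SET of distinct digits by
-- membership tests (objective: alternative algorithm); equivalence is about the
-- RETURN value only — A sorts its argument in place, B does not mutate it.

-- ===== PORT A =====
-- loop body of A's for-loop (start, diff_not_one) — kept as a named step function
def pvStepA (st : Int × List Int) (digit : Int) : Int × List Int :=
  if |st.1 - digit| ≠ 1 then (digit, st.2 ++ [|st.1 - digit|]) else (digit, st.2)

def is_sequence (list_of_digits : List Int) : Int :=
  let s := PySem.List.sorted list_of_digits (fun x => x)
  match PySem.List.pyGet? s 0, PySem.List.pyGet? s (-1) with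
  | some first, some last =>
      let r := (s.drop 1).foldl pvStepA (first, [])
      let dn := PySem.List.sorted r.2 (fun x => x)
      let n : Nat := dn.length
      if n = 0 then 1
      else if first = 0 ∧ last = 9 then
        if n = 1 then (if dn.getD 0 0 = 2 then 2 else 1)
        else if n = 2 ∧ dn.getD 0 0 = 2 ∧ dn.getD 1 0 ≠ 2 then 2
        else 0
      else if first = 0 ∧ last = 8 then
        if n = 1 then 2 else 0
      else if n = 1 ∧ dn.getD 0 0 = 2 then 2 else 0
  | _, _ => 0    -- IndexError on the empty list; excluded by Pre_

-- ===== PORT B =====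
-- loop body of B's for-loop over the set: state (t, c2)
def pvStepB (S : PySem.Set Int) (hi : Int) (st : Int × Int) (d : Int) : Int × Int :=
  if d ≠ hi ∧ ¬ PySem.Set.contains S (d + 1) then
    (st.1 + 1, st.2 + (if PySem.Set.contains S (d + 2) then 1 else 0))
  else st

def is_sequence_alt (list_of_digits : List Int) : Int :=
  let S : PySem.Set Int := PySem.Set.ofList list_of_digits
  match PySem.List.min? S (fun x => x) with
  | none => 0    -- ValueError (min of an empty set) on the empty list; excluded by Pre_
  | some lo =>
    match PySem.List.max? S (fun x => x) with
    | none => 0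
    | some hi =>
      let dup : Int := (list_of_digits.length : Int) - (PySem.Set.len S : Int)
      let st := S.foldl (pvStepB S hi) (0, 0)
      let m := dup + st.1
      if m = 0 then 1
      else if lo = 0 ∧ hi = 9 then
        if m = 1 then (if dup = 0 ∧ st.2 = 1 then 2 else 1)
        else if dup = 0 ∧ st.1 = 2 ∧ st.2 = 1 then 2 else 0
      else if lo = 0 ∧ hi = 8 then
        if m = 1 then 2 else 0
      else if dup = 0 ∧ st.1 = 1 ∧ st.2 = 1 then 2 else 0

-- ===== PRECONDITION & SPEC =====
-- A raises IndexError (list_of_digits[0]) exactly on the empty list; nothing else is excluded.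
def Pre_is_sequence (list_of_digits : List Int) : Prop := list_of_digits ≠ []
instance (list_of_digits : List Int) : Decidable (Pre_is_sequence list_of_digits) := by unfold Pre_is_sequence; infer_instance
def pvWitness_is_sequence : List Int := [1, 2, 3]

def Spec_is_sequence (list_of_digits : List Int) (out : Int) : Prop := out = is_sequence_alt list_of_digits
instance (list_of_digits : List Int) (out : Int) : Decidable (Spec_is_sequence list_of_digits out) := by unfold Spec_is_sequence; infer_instance

-- ===== CLAIM (what is proved, stated in full; the proofs are below) =====
def Claim_equal_is_sequence : Prop := ∀ (list_of_digits : List Int), Dom_is_sequence list_of_digits → Pre_is_sequence list_of_digits → Spec_is_sequence list_of_digits (is_sequence list_of_digits)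

-- ===== LEMMAS AND PROOFS =====

def pvChain : Int → List Int → Prop
  | _, [] => True
  | p, c :: t => p ≤ c ∧ pvChain c t

def pvGaps : Int → List Int → List Int
  | _, [] => []
  | p, c :: t => if c - p ≠ 1 then (c - p) :: pvGaps c t else pvGaps c t

def pvSquash : List Int → List Int
  | [] => []
  | [x] => [x]
  | x :: y :: t => if y = x then pvSquash (y :: t) else x :: pvSquash (y :: t)

theorem pairwise_pvChain : ∀ (t : List Int) (p : Int),
    (p :: t).Pairwise (· ≤ ·) → pvChain p t := by
  intro t
  induction t with
  | nil => intro p _; trivial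
  | cons c t ih =>
      intro p hp
      rw [List.pairwise_cons] at hp
      exact ⟨hp.1 c (by simp), ih c hp.2⟩

theorem pvChain_le_of_mem : ∀ (t : List Int) (p x : Int), pvChain p t → x ∈ p :: t → p ≤ x := by
  intro t
  induction t with
  | nil => intro p x _ hx; simp at hx; omega
  | cons c t ih =>
      intro p x hch hx
      rcases List.mem_cons.1 hx with h | h
      · omega
      · have h1 := hch.1
        have := ih c x hch.2 h
        omega

theorem mem_pvSquash : ∀ (L : List Int) (x : Int), x ∈ pvSquash L ↔ x ∈ L := by
  intro L
  induction L with
  | nil => simp [pvSquash]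
  | cons a L ih =>
      intro x
      cases L with
      | nil => simp [pvSquash]
      | cons b t =>
          by_cases h : b = a
          · subst h
            simp only [pvSquash, if_true, ih x]
            simp only [List.mem_cons]
            tauto
          · simp only [pvSquash, if_neg h, List.mem_cons, ih x]

theorem pvSquash_pairwise_lt : ∀ (t : List Int) (p : Int), pvChain p t →
    (pvSquash (p :: t)).Pairwise (· < ·) := by
  intro t
  induction t with
  | nil => intro p _; simp [pvSquash]
  | cons c t ih =>
      intro p hch
      by_cases h : c = p
      · simpa [pvSquash, h] using ih c hch.2
      · have hlt : p < c := by have := hch.1; omega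
        simp only [pvSquash, if_neg h]
        rw [List.pairwise_cons]
        refine ⟨?_, ih c hch.2⟩
        intro x hx
        have hxm : x ∈ c :: t := (mem_pvSquash _ _).1 hx
        have := pvChain_le_of_mem t c x hch.2 hxm
        omega

theorem gaps_count0 : ∀ (t : List Int) (p : Int), pvChain p t →
    (pvGaps p t).count 0 + (pvSquash (p :: t)).length = t.length + 1 := by
  intro t
  induction t with
  | nil => intro p _; simp [pvGaps, pvSquash]
  | cons c t ih =>
      intro p hch
      have hpc : p ≤ c := hch.1
      have ihc := ih c hch.2
      by_cases h : c = p
      · have hz : (c - p == 0) = true := by simp; omega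
        simp only [pvGaps, pvSquash, if_pos h, if_pos (by omega : c - p ≠ 1),
          List.count_cons, hz, if_true]
        simp only [List.length_cons] at ihc ⊢
        omega
      · simp only [pvSquash, if_neg h]
        by_cases hg : c - p = 1
        · simp only [pvGaps, hg, ne_eq, not_true_eq_false, if_false]
          simp only [List.length_cons] at ihc ⊢
          omega
        · have hz : (c - p == 0) = false := by simp; omega
          simp only [pvGaps, if_pos (by omega : c - p ≠ 1), List.count_cons, hz, Bool.false_eq_true, if_false]
          simp only [List.length_cons] at ihc ⊢
          omega

theorem gaps_big : ∀ (t : List Int) (p hi : Int), pvChain p t →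
    (∀ x ∈ p :: t, x ≤ hi) → hi ∈ p :: t →
    (pvGaps p t).countP (fun g => decide (g ≠ 0)) =
    (pvSquash (p :: t)).countP (fun d => decide (d ≠ hi) && !(decide (d + 1 ∈ p :: t))) := by
  intro t
  induction t with
  | nil =>
      intro p hi _ _ hmem
      have hp : hi = p := by simpa using hmem
      simp [pvGaps, pvSquash, hp]
  | cons c t ih =>
      intro p hi hch hle hmem
      have hpc : p ≤ c := hch.1
      have hcle : ∀ x ∈ c :: t, c ≤ x := fun x hx => pvChain_le_of_mem t c x hch.2 hx
      have hle' : ∀ x ∈ c :: t, x ≤ hi := fun x hx => hle x (List.mem_cons_of_mem p hx)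
      by_cases h : c = p
      · have hmem' : hi ∈ c :: t := by
          rcases List.mem_cons.1 hmem with h1 | h1
          · subst h1; simp [← h]
          · exact h1
        have hcong : ∀ d ∈ pvSquash (c :: t),
            ((decide (d ≠ hi) && !(decide (d + 1 ∈ p :: c :: t))) = true
              ↔ (decide (d ≠ hi) && !(decide (d + 1 ∈ c :: t))) = true) := by
          intro d _
          have hm : (d + 1 ∈ p :: c :: t) ↔ (d + 1 ∈ c :: t) := by
            subst h; simp [List.mem_cons]
          rw [decide_eq_decide.mpr hm]
        have hc2 := List.countP_congr hcong
        have hz : (decide ((c - p : Int) ≠ 0)) = false := by simp; omega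
        simp only [pvGaps, pvSquash, if_pos h, if_pos (by omega : c - p ≠ 1),
          List.countP_cons, hz, Bool.false_eq_true, if_false]
        rw [ih c hi hch.2 hle' hmem', hc2]
        omega
      · have hlt : p < c := by omega
        have hmem' : hi ∈ c :: t := by
          rcases List.mem_cons.1 hmem with h1 | h1
          · exfalso; have := hle' c (by simp); omega
          · exact h1
        have hcong : ∀ d ∈ pvSquash (c :: t),
            ((decide (d ≠ hi) && !(decide (d + 1 ∈ p :: c :: t))) = true
              ↔ (decide (d ≠ hi) && !(decide (d + 1 ∈ c :: t))) = true) := by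
          intro d hd
          have hdc : c ≤ d := hcle d ((mem_pvSquash _ _).1 hd)
          have hm : (d + 1 ∈ p :: c :: t) ↔ (d + 1 ∈ c :: t) := by
            simp only [List.mem_cons]
            constructor
            · rintro (h1 | h1)
              · omega
              · exact h1
            · tauto
          rw [decide_eq_decide.mpr hm]
        have hc2 := List.countP_congr hcong
        simp only [pvSquash, if_neg h]
        by_cases hg : c - p = 1
        · have hp1 : (decide (p + 1 ∈ p :: c :: t)) = true := by
            have hc : p + 1 = c := by omega
            simp [hc]
          simp only [pvGaps, hg, ne_eq, not_true_eq_false, if_false, List.countP_cons,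
            hp1, Bool.not_true, Bool.and_false, if_neg (by simp : ¬(false = true))]
          rw [ih c hi hch.2 hle' hmem', hc2]
          omega
        · have hge : 2 ≤ c - p := by omega
          have hphi : p ≠ hi := by have := hle' c (by simp); omega
          have hp1 : (decide (p + 1 ∈ p :: c :: t)) = false := by
            simp only [decide_eq_false_iff_not, List.mem_cons]
            push Not
            refine ⟨by omega, by omega, ?_⟩
            intro h1
            have := hcle (p+1) (List.mem_cons_of_mem c h1)
            omega
          have hzg : (decide ((c - p : Int) ≠ 0)) = true := by simp; omega
          simp only [pvGaps, if_pos (by omega : c - p ≠ 1), List.countP_cons, hzg,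
            hp1, Bool.not_false, if_pos (by simp [hphi] : (decide (p ≠ hi) && true) = true)]
          rw [ih c hi hch.2 hle' hmem', hc2]
          simp

theorem gaps_count2 : ∀ (t : List Int) (p : Int), pvChain p t →
    (pvGaps p t).count 2 =
    (pvSquash (p :: t)).countP (fun d => !(decide (d + 1 ∈ p :: t)) && decide (d + 2 ∈ p :: t)) := by
  intro t
  induction t with
  | nil => intro p _; simp [pvGaps, pvSquash]
  | cons c t ih =>
      intro p hch
      have hpc : p ≤ c := hch.1
      have hcle : ∀ x ∈ c :: t, c ≤ x := fun x hx => pvChain_le_of_mem t c x hch.2 hx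
      by_cases h : c = p
      · have hcong : ∀ d ∈ pvSquash (c :: t),
            ((!(decide (d + 1 ∈ p :: c :: t)) && decide (d + 2 ∈ p :: c :: t)) = true
              ↔ (!(decide (d + 1 ∈ c :: t)) && decide (d + 2 ∈ c :: t)) = true) := by
          intro d _
          have hm1 : (d + 1 ∈ p :: c :: t) ↔ (d + 1 ∈ c :: t) := by
            subst h; simp [List.mem_cons]
          have hm2 : (d + 2 ∈ p :: c :: t) ↔ (d + 2 ∈ c :: t) := by
            subst h; simp [List.mem_cons]
          rw [decide_eq_decide.mpr hm1, decide_eq_decide.mpr hm2]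
        have hc2 := List.countP_congr hcong
        have hz : ((c - p : Int) == 2) = false := by simp; omega
        simp only [pvGaps, pvSquash, if_pos h, if_pos (by omega : c - p ≠ 1),
          List.count_cons, hz, Bool.false_eq_true, if_false]
        rw [ih c hch.2, hc2]
        omega
      · have hlt : p < c := by omega
        have hcong : ∀ d ∈ pvSquash (c :: t),
            ((!(decide (d + 1 ∈ p :: c :: t)) && decide (d + 2 ∈ p :: c :: t)) = true
              ↔ (!(decide (d + 1 ∈ c :: t)) && decide (d + 2 ∈ c :: t)) = true) := by
          intro d hd
          have hdc : c ≤ d := hcle d ((mem_pvSquash _ _).1 hd)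
          have hm1 : (d + 1 ∈ p :: c :: t) ↔ (d + 1 ∈ c :: t) := by
            simp only [List.mem_cons]
            constructor
            · rintro (h1 | h1)
              · omega
              · exact h1
            · tauto
          have hm2 : (d + 2 ∈ p :: c :: t) ↔ (d + 2 ∈ c :: t) := by
            simp only [List.mem_cons]
            constructor
            · rintro (h1 | h1)
              · omega
              · exact h1
            · tauto
          rw [decide_eq_decide.mpr hm1, decide_eq_decide.mpr hm2]
        have hc2 := List.countP_congr hcong
        simp only [pvSquash, if_neg h]
        by_cases hg : c - p = 1
        · have hp1 : (decide (p + 1 ∈ p :: c :: t)) = true := by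
            have hc : p + 1 = c := by omega
            simp [hc]
          simp only [pvGaps, hg, ne_eq, not_true_eq_false, if_false, List.countP_cons,
            hp1, Bool.not_true, Bool.false_and, if_neg (by simp : ¬(false = true))]
          rw [ih c hch.2, hc2]
          omega
        · have hp1 : (decide (p + 1 ∈ p :: c :: t)) = false := by
            simp only [decide_eq_false_iff_not, List.mem_cons]
            push Not
            refine ⟨by omega, by omega, ?_⟩
            intro h1
            have := hcle (p+1) (List.mem_cons_of_mem c h1)
            omega
          by_cases hg2 : c - p = 2
          · have hp2 : (decide (p + 2 ∈ p :: c :: t)) = true := by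
              have hc : p + 2 = c := by omega
              simp [hc]
            have hz : ((c - p : Int) == 2) = true := by simp; omega
            simp only [pvGaps, if_pos (by omega : c - p ≠ 1), List.count_cons, hz,
              List.countP_cons, hp1, hp2, Bool.not_false, Bool.true_and]
            simp only [ih c hch.2, hc2]
          · have hp2 : (decide (p + 2 ∈ p :: c :: t)) = false := by
              simp only [decide_eq_false_iff_not, List.mem_cons]
              push Not
              refine ⟨by omega, by omega, ?_⟩
              intro h1
              have := hcle (p+2) (List.mem_cons_of_mem c h1)
              omega
            have hz : ((c - p : Int) == 2) = false := by simp; omega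
            simp only [pvGaps, if_pos (by omega : c - p ≠ 1), List.count_cons, hz,
              Bool.false_eq_true, if_false, List.countP_cons, hp1, hp2, Bool.not_false,
              Bool.true_and]
            simp only [ih c hch.2, hc2]

theorem gaps_elems : ∀ (t : List Int) (p : Int), pvChain p t →
    ∀ g ∈ pvGaps p t, g = 0 ∨ 2 ≤ g := by
  intro t
  induction t with
  | nil => intro p _ g hg; simp [pvGaps] at hg
  | cons c t ih =>
      intro p hch g hg
      have hpc : p ≤ c := hch.1
      by_cases h : c - p ≠ 1
      · simp only [pvGaps, if_pos h, List.mem_cons] at hg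
        rcases hg with h1 | h1
        · omega
        · exact ih c hch.2 g h1
      · simp only [pvGaps, if_neg h] at hg
        exact ih c hch.2 g hg

theorem foldA_gaps : ∀ (t : List Int) (p : Int) (acc : List Int),
    pvChain p t →
    (t.foldl pvStepA (p, acc)).2 = acc ++ pvGaps p t := by
  intro t
  induction t with
  | nil => intro p acc _; simp [pvGaps]
  | cons c t ih =>
      intro p acc hch
      obtain ⟨hpc, hch2⟩ := hch
      have habs : |p - c| = c - p := by
        rw [abs_sub_comm]; exact abs_of_nonneg (by omega)
      by_cases hg : c - p ≠ 1
      · have hst : pvStepA (p, acc) c = (c, acc ++ [c - p]) := by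
          simp [pvStepA, habs, hg]
        simp only [List.foldl_cons, hst, ih c _ hch2, pvGaps, if_pos hg]
        simp
      · have hst : pvStepA (p, acc) c = (c, acc) := by
          simp [pvStepA, habs]; omega
        simp only [List.foldl_cons, hst, ih c _ hch2, pvGaps, if_neg hg]

theorem foldB_counts : ∀ (X : List Int) (S : PySem.Set Int) (hi : Int) (st : Int × Int),
    X.foldl (pvStepB S hi) st =
      (st.1 + (X.countP (fun d => decide (d ≠ hi) && !(PySem.Set.contains S (d + 1))) : Int),
       st.2 + (X.countP (fun d => (decide (d ≠ hi) && !(PySem.Set.contains S (d + 1)))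
                  && PySem.Set.contains S (d + 2)) : Int)) := by
  intro X
  induction X with
  | nil => intro S hi st; simp
  | cons d X ih =>
      intro S hi st
      simp only [List.foldl_cons, List.countP_cons]
      by_cases hc : d ≠ hi ∧ ¬ PySem.Set.contains S (d + 1)
      · have hb : (decide (d ≠ hi) && !(PySem.Set.contains S (d + 1))) = true := by
          rw [Bool.and_eq_true, decide_eq_true_eq, Bool.not_eq_true']
          exact ⟨hc.1, by revert hc; cases PySem.Set.contains S (d + 1) <;> simp⟩
        rw [show pvStepB S hi st d
            = (st.1 + 1, st.2 + (if PySem.Set.contains S (d + 2) then 1 else 0)) from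
          by rw [pvStepB, if_pos hc]]
        rw [ih]
        cases h2 : PySem.Set.contains S (d + 2)
        · simp only [hb, h2, Bool.and_false, Bool.false_eq_true, if_false,
            if_true, Prod.mk.injEq]
          constructor <;> omega
        · simp only [hb, h2, Bool.true_and, Bool.and_true, if_true, Prod.mk.injEq]
          constructor <;> omega
      · have hb : (decide (d ≠ hi) && !(PySem.Set.contains S (d + 1))) = false := by
          rcases not_and_or.1 hc with h1 | h1
          · have hd : d = hi := by tauto
            simp [hd]
          · have hct : PySem.Set.contains S (d + 1) = true := by
              revert h1; cases PySem.Set.contains S (d + 1) <;> simp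
            rw [hct]; simp
        rw [show pvStepB S hi st d = st from by rw [pvStepB, if_neg hc]]
        rw [ih]
        simp only [hb, Bool.false_and, Bool.false_eq_true, if_false, Prod.mk.injEq]
        constructor <;> omega

theorem count0_add_countPne (l : List Int) :
    l.count 0 + l.countP (fun x => decide (x ≠ 0)) = l.length := by
  induction l with
  | nil => simp
  | cons a l ih =>
      simp only [ne_eq, decide_not] at ih ⊢
      by_cases h : a = 0 <;> simp [List.count_cons, List.countP_cons, h] <;> omega

theorem classify_core (first last : Int) (dn : List Int)
    (hs : dn.Pairwise (· ≤ ·)) (hg : ∀ x ∈ dn, x = 0 ∨ 2 ≤ x) :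
    (if dn.length = 0 then (1:Int)
     else if first = 0 ∧ last = 9 then
       if dn.length = 1 then (if dn.getD 0 0 = 2 then 2 else 1)
       else if dn.length = 2 ∧ dn.getD 0 0 = 2 ∧ dn.getD 1 0 ≠ 2 then 2
       else 0
     else if first = 0 ∧ last = 8 then
       if dn.length = 1 then 2 else 0
     else if dn.length = 1 ∧ dn.getD 0 0 = 2 then 2 else 0)
    =
    (if ((dn.count 0 : Int) + (dn.countP (fun x => decide (x ≠ 0)) : Int)) = 0 then 1
     else if first = 0 ∧ last = 9 then
       if ((dn.count 0 : Int) + (dn.countP (fun x => decide (x ≠ 0)) : Int)) = 1 then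
         (if (dn.count 0 : Int) = 0 ∧ (dn.count 2 : Int) = 1 then 2 else 1)
       else if (dn.count 0 : Int) = 0 ∧ (dn.countP (fun x => decide (x ≠ 0)) : Int) = 2 ∧ (dn.count 2 : Int) = 1 then 2 else 0
     else if first = 0 ∧ last = 8 then
       if ((dn.count 0 : Int) + (dn.countP (fun x => decide (x ≠ 0)) : Int)) = 1 then 2 else 0
     else if (dn.count 0 : Int) = 0 ∧ (dn.countP (fun x => decide (x ≠ 0)) : Int) = 1 ∧ (dn.count 2 : Int) = 1 then 2 else 0) := by
  match dn with
  | [] => simp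
  | [a] =>
      have ha := hg a (by simp)
      by_cases h0 : a = 0 <;> by_cases h2 : a = 2 <;>
        simp [List.count_cons, List.countP_cons, h0, h2] <;>
        first
          | omega
          | (split_ifs <;> omega)
  | [a, b] =>
      have ha := hg a (by simp)
      have hb := hg b (by simp)
      have hab : a ≤ b := by
        rw [List.pairwise_cons] at hs
        exact hs.1 b (by simp)
      by_cases ha0 : a = 0 <;> by_cases hb0 : b = 0 <;>
        by_cases ha2 : a = 2 <;> by_cases hb2 : b = 2 <;>
        simp [List.count_cons, List.countP_cons, ha0, hb0, ha2, hb2] <;>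
        first
          | omega
          | (split_ifs <;> omega)
  | a :: b :: c :: r =>
      have hlen : (a :: b :: c :: r).length = r.length + 3 := by simp
      have hcount := count0_add_countPne (a :: b :: c :: r)
      have hm3 : 3 ≤ (a :: b :: c :: r).count 0 + (a :: b :: c :: r).countP (fun x => decide (x ≠ 0)) := by
        omega
      rw [if_neg (by omega : ¬((a :: b :: c :: r).length = 0)),
        if_neg (by push_cast; omega :
          ¬(((a :: b :: c :: r).count 0 : Int) + ((a :: b :: c :: r).countP (fun x => decide (x ≠ 0)) : Int) = 0))]
      split_ifs <;> push_cast at * <;> omega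

theorem chain_le_getLastD : ∀ (t : List Int) (p : Int), pvChain p t →
    ∀ x ∈ p :: t, x ≤ (p :: t).getLastD 0 := by
  intro t
  induction t with
  | nil => intro p _ x hx; simp at hx; simp [hx]
  | cons c t ih =>
      intro p hch x hx
      have h1 : (p :: c :: t).getLastD 0 = (c :: t).getLastD 0 := by simp
      rw [h1]
      rcases List.mem_cons.1 hx with h | h
      · have := ih c hch.2 c (by simp)
        have hpc : p ≤ c := hch.1
        omega
      · exact ih c hch.2 x h

theorem pv_main_equiv : ∀ (l : List Int), l ≠ [] → is_sequence l = is_sequence_alt l := by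
  intro l hpre
  cases hs : PySem.List.sorted l (fun x => x) with
  | nil => exact absurd ((PySem.List.sorted_eq_nil_iff _ _ _).1 hs) hpre
  | cons first t =>
      -- chain facts
      have hpw : (first :: t).Pairwise (· ≤ ·) := by
        have hp := PySem.List.sorted_pairwise l (fun x : Int => x)
        rw [hs] at hp
        simpa using hp
      have hch : pvChain first t := pairwise_pvChain t first hpw
      -- membership bridge: S ↔ l ↔ first :: t
      have hmem_sorted : ∀ x : Int, x ∈ first :: t ↔ x ∈ l := by
        intro x
        rw [← hs]
        exact PySem.List.mem_sorted l (fun x => x) false x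
      have hmemS : ∀ x : Int, x ∈ PySem.Set.ofList l ↔ x ∈ first :: t := by
        intro x
        rw [PySem.Set.mem_ofList, hmem_sorted]
      -- last element
      set z := (first :: t).getLastD 0 with hz
      have hgl : (first :: t).getLast? = some z := by
        cases hw : (first :: t).getLast? with
        | none => simp at hw
        | some w => simp [hz, List.getLastD_eq_getLast?, hw]
      have hzmem : z ∈ first :: t := by
        have := List.mem_of_getLast? hgl
        exact this
      have hzmax : ∀ x ∈ first :: t, x ≤ z := chain_le_getLastD t first hch
      -- A: pyGet? facts
      have hget0 : PySem.List.pyGet? (first :: t) 0 = some first := by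
        rw [PySem.List.pyGet?_zero_cons]
      have hgetm1 : PySem.List.pyGet? (first :: t) (-1) = some z := by
        rw [PySem.List.pyGet?_neg_one, hgl]
      -- B: min / max
      have hSne : PySem.Set.ofList l ≠ [] := by
        intro hS
        have : first ∈ PySem.Set.ofList l := (hmemS first).2 (by simp)
        rw [hS] at this
        simp at this
      have hmin : PySem.List.min? (PySem.Set.ofList l) (fun x => x) = some first := by
        cases hm : PySem.List.min? (PySem.Set.ofList l) (fun x => x) with
        | none => exact absurd ((PySem.List.min?_eq_none_iff _ _).1 hm) hSne
        | some lo =>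
            have hloS : lo ∈ PySem.Set.ofList l := PySem.List.min?_mem hm
            have hlo1 : first ≤ lo := pvChain_le_of_mem t first lo hch ((hmemS lo).1 hloS)
            have hlo2 : lo ≤ first := by
              have hfS : first ∈ PySem.Set.ofList l := (hmemS first).2 (by simp)
              have := PySem.List.min?_isMin hm first hfS
              simpa using this
            have : lo = first := le_antisymm hlo2 hlo1
            rw [this]
      have hmax : PySem.List.max? (PySem.Set.ofList l) (fun x => x) = some z := by
        cases hm : PySem.List.max? (PySem.Set.ofList l) (fun x => x) with
        | none => exact absurd ((PySem.List.max?_eq_none_iff _ _).1 hm) hSne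
        | some hi =>
            have hhiS : hi ∈ PySem.Set.ofList l := PySem.List.max?_mem hm
            have hhi1 : hi ≤ z := hzmax hi ((hmemS hi).1 hhiS)
            have hhi2 : z ≤ hi := by
              have hzS : z ∈ PySem.Set.ofList l := (hmemS z).2 hzmem
              have := PySem.List.max?_isMax hm z hzS
              simpa using this
            have : hi = z := le_antisymm hhi1 hhi2
            rw [this]
      -- reduce port A and port B
      simp only [is_sequence, is_sequence_alt, hs, hget0, hgetm1, hmin, hmax,
        List.drop_succ_cons, List.drop_zero]
      rw [foldA_gaps t first [] hch, foldB_counts]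
      simp only [List.nil_append, zero_add]
      -- abbreviations
      have helems := gaps_elems t first hch
      have hsq_nodup : (pvSquash (first :: t)).Nodup :=
        (pvSquash_pairwise_lt t first hch).imp (fun h => ne_of_lt h)
      have hperm : (PySem.Set.ofList l).Perm (pvSquash (first :: t)) :=
        (List.perm_ext_iff_of_nodup (PySem.Set.nodup_ofList l) hsq_nodup).2
          (fun a => by rw [mem_pvSquash]; exact hmemS a)
      have hcontains : ∀ x : Int,
          PySem.Set.contains (PySem.Set.ofList l) x = decide (x ∈ first :: t) := by
        intro x
        by_cases h : x ∈ first :: t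
        · rw [decide_eq_true h]
          exact (PySem.Set.contains_iff _ _).2 ((hmemS x).2 h)
        · rw [decide_eq_false h]
          cases hcx : PySem.Set.contains (PySem.Set.ofList l) x
          · rfl
          · exact absurd ((hmemS x).1 ((PySem.Set.contains_iff _ _).1 hcx)) h
      -- the three count equations
      have ht : (PySem.Set.ofList l).countP
            (fun d => decide (d ≠ z) && !(PySem.Set.contains (PySem.Set.ofList l) (d + 1)))
          = (pvGaps first t).countP (fun x => decide (x ≠ 0)) := by
        rw [hperm.countP_eq]
        simp only [hcontains]
        exact (gaps_big t first z hch hzmax hzmem).symm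
      have hc2 : (PySem.Set.ofList l).countP
            (fun d => (decide (d ≠ z) && !(PySem.Set.contains (PySem.Set.ofList l) (d + 1)))
              && PySem.Set.contains (PySem.Set.ofList l) (d + 2))
          = (pvGaps first t).count 2 := by
        rw [hperm.countP_eq]
        simp only [hcontains]
        have hcong : ∀ d ∈ pvSquash (first :: t),
            (((decide (d ≠ z) && !(decide (d + 1 ∈ first :: t))) && decide (d + 2 ∈ first :: t)) = true
              ↔ ((!(decide (d + 1 ∈ first :: t))) && decide (d + 2 ∈ first :: t)) = true) := by
          intro d _
          by_cases h2 : d + 2 ∈ first :: t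
          · have hdz : d ≠ z := by have := hzmax (d + 2) h2; omega
            simp [h2, hdz]
          · simp [h2]
        rw [List.countP_congr hcong]
        exact (gaps_count2 t first hch).symm
      have hlen1 : l.length = t.length + 1 := by
        have := PySem.List.length_sorted l (fun x : Int => x) false
        rw [hs] at this
        simpa using this.symm
      have h0 := gaps_count0 t first hch
      have hlenS : (PySem.Set.ofList l).length = (pvSquash (first :: t)).length :=
        hperm.length_eq
      have hdup : (l.length : Int) - PySem.Set.len (PySem.Set.ofList l)
          = ((pvGaps first t).count 0 : Int) := by
        simp only [PySem.Set.len]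
        push_cast
        omega
      rw [ht, hc2, hdup]
      -- classification bridge
      have hApw : (PySem.List.sorted (pvGaps first t) (fun x => x) false).Pairwise (· ≤ ·) := by
        simpa using PySem.List.sorted_pairwise (pvGaps first t) (fun x : Int => x)
      have hAel : ∀ x ∈ PySem.List.sorted (pvGaps first t) (fun x => x) false,
          x = 0 ∨ 2 ≤ x := fun x hx =>
        helems x ((PySem.List.mem_sorted (pvGaps first t) _ false x).1 hx)
      have hbridge := classify_core first z _ hApw hAel
      have hp : (PySem.List.sorted (pvGaps first t) (fun x => x) false).Perm (pvGaps first t) :=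
        PySem.List.sorted_perm (pvGaps first t) _ false
      simp only [hp.count_eq, hp.countP_eq] at hbridge
      exact hbridge

-- ===== VERDICT (by name: the statement is the Claim_ definition above) =====
theorem is_sequence_spec : Claim_equal_is_sequence := by
  intro l _ hpre
  unfold Spec_is_sequence
  exact pv_main_equiv l hpre
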